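-- pv_equiv track=rewrite | github.com/kebishpius/Leet-Code-Python | 2341-CountPrefixesOfAGivenString/2341-CountPrefixesOfAGivenString.py | countPrefixes
-- ===== SOURCE A (Python) =====
-- def countPrefixes(words, s):
--     x=[]
--     for i in range(len(words)):
--         for j in range(len(s)):
--             if words[i] == s[0:j+1]:
--                 x.append(words[i])
--
--     return len(x)
--
--
--
--
--
--
--
--
--     """
--     :type words: List[str]
--     :type s: str
--     :rtype: int
--     """
-- ===== SOURCE B (Python) =====
-- def countPrefixes(words, s):
--     prefixes = {s[:i] for i in range(1, len(s) + 1)}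
--     return sum(1 for w in words if w in prefixes)
-- ===== Notes on version B (the rewrite author's own statement) =====
-- stated objective: faster
-- what changed: B precomputes the set of all nonempty prefixes of s once and counts words by set membership, replacing A's nested scan that compares every word against every prefix of s and materialises a list of matches.
import Mathlib
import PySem

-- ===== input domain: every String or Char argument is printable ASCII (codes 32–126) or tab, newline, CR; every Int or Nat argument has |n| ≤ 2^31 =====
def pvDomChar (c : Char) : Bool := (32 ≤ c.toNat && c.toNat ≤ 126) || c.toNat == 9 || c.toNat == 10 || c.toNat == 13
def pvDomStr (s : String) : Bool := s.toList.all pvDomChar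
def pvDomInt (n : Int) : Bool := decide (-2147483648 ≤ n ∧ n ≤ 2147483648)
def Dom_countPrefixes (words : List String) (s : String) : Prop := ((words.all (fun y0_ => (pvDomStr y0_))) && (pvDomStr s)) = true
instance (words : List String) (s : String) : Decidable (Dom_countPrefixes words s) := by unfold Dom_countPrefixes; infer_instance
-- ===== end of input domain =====

-- B builds the set of nonempty prefixes of s once and counts words by membership,
-- instead of A's nested loop comparing each word against every prefix and collecting matches.

-- ===== PORT A =====
def countPrefixes (words : List String) (s : String) : Int :=
  let x : List String :=
    (PySem.List.pyRange 0 (PySem.List.len words)).foldl (fun x i =>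
      (PySem.List.pyRange 0 (PySem.Str.len s)).foldl (fun x j =>
        if PySem.List.pyGetD words i "" = PySem.Str.slice s (some 0) (some (j + 1)) then
          x ++ [PySem.List.pyGetD words i ""]
        else x) x) []
  PySem.List.len x

-- ===== PORT B =====
def countPrefixes_alt (words : List String) (s : String) : Int :=
  let prefixes : PySem.Set String :=
    PySem.Set.ofList ((PySem.List.pyRange 1 (PySem.Str.len s + 1)).map
      (fun i => PySem.Str.slice s none (some i)))
  ((words.countP (fun w => PySem.Set.contains prefixes w) : Nat) : Int)


-- ===== PRECONDITION & SPEC =====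
def Spec_countPrefixes (words : List String) (s : String) (out : Int) : Prop := out = countPrefixes_alt words s
instance (words : List String) (s : String) (out : Int) : Decidable (Spec_countPrefixes words s out) := by unfold Spec_countPrefixes; infer_instance

-- ===== CLAIM (what is proved, stated in full; the proofs are below) =====
def Claim_equal_countPrefixes : Prop := ∀ (words : List String) (s : String), Dom_countPrefixes words s → Spec_countPrefixes words s (countPrefixes words s)

-- ===== LEMMAS AND PROOFS =====

theorem pv_len_foldl_append {α β : Type} (l : List α) (F : α → List β) (acc : List β) :
    (l.foldl (fun x w => x ++ F w) acc).length
      = acc.length + (l.map (fun w => (F w).length)).sum := by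
  induction l generalizing acc with
  | nil => simp
  | cons a l ih =>
    rw [List.foldl_cons, ih]
    simp [add_assoc]

theorem pv_countP_range (n : Nat) (q : Nat → Bool)
    (hq : ∀ k1 k2, k1 < n → k2 < n → q k1 → q k2 → k1 = k2) :
    (List.range n).countP q = if ∃ k, k < n ∧ q k = true then 1 else 0 := by
  induction n with
  | zero => simp
  | succ n ih =>
    rw [List.range_succ, List.countP_append,
      ih (fun k1 k2 h1 h2 => hq k1 k2 (by omega) (by omega))]
    by_cases hn : q n = true
    · have : ¬ ∃ k, k < n ∧ q k = true := by
        rintro ⟨k, hk, hqk⟩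
        have := hq k n (by omega) (by omega) hqk hn
        omega
      simp [hn, this]
      exact ⟨n, by omega, hn⟩
    · simp [hn]
      congr 1
      apply propext
      constructor <;> rintro ⟨k, hk, hqk⟩
      · exact ⟨k, by omega, hqk⟩
      · refine ⟨k, ?_, hqk⟩
        rcases Nat.lt_succ_iff_lt_or_eq.mp (Nat.lt_succ_of_le hk) with h | h
        · exact h
        · exact absurd (h ▸ hqk) hn

theorem pv_sum_map_ite {α : Type} (l : List α) (p : α → Bool) :
    (l.map (fun w => if p w then 1 else 0)).sum = l.countP p := by
  induction l with
  | nil => simp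
  | cons a l ih => by_cases h : p a <;> simp [h, ih, Nat.add_comm]

theorem pv_inner {α β : Type} (l : List α) (P : α → Prop) [DecidablePred P] (y : β) (acc : List β) :
    l.foldl (fun x j => if P j then x ++ [y] else x) acc
      = acc ++ (l.filter (fun j => decide (P j))).map (fun _ => y) := by
  induction l generalizing acc with
  | nil => simp
  | cons a l ih => by_cases h : P a <;> simp [h, ih]

theorem pv_gA (s : String) (k : Nat) :
    (PySem.Str.slice s (some 0) (some ((k:Int) + 1))).toList = s.toList.take (k + 1) := by
  rw [PySem.Str.toList_slice]
  simp only [PySem.Chars.slice_eq_listSlice, PySem.List.slice_zero_start]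
  rw [show ((k:Int) + 1) = ((k+1 : Nat) : Int) by push_cast; ring, PySem.List.slice_to_natCast]

theorem pv_gB (s : String) (i : Int) (h : 0 ≤ i) :
    (PySem.Str.slice s none (some i)).toList = s.toList.take i.toNat := by
  rw [PySem.Str.toList_slice]
  simp only [PySem.Chars.slice_eq_listSlice]
  rw [PySem.List.slice_to _ h]

-- per-word: inner count equals the B-side membership indicator
theorem pv_word (s : String) (w : String) :
    (List.range s.toList.length).countP
        (fun (k : Nat) => decide (w = PySem.Str.slice s (some 0) (some ((k:Int) + 1))))
      = if PySem.Set.contains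
            (PySem.Set.ofList ((PySem.List.pyRange 1 (PySem.Str.len s + 1)).map
              (fun i => PySem.Str.slice s none (some i)))) w = true
        then 1 else 0 := by
  set n := s.toList.length with hn
  rw [pv_countP_range]
  · congr 1
    apply propext
    rw [PySem.Set.contains_iff, PySem.Set.mem_ofList, List.mem_map]
    constructor
    · rintro ⟨k, hk, hqk⟩
      rw [decide_eq_true_eq] at hqk
      refine ⟨(k:Int) + 1, PySem.List.mem_pyRange_one.mpr ⟨by omega, ?_⟩, ?_⟩
      · rw [PySem.Str.len_eq, ← hn]; omega
      · rw [hqk, ← String.toList_inj, pv_gA, pv_gB s _ (by omega)]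
        congr 1
    · rintro ⟨i, hi, hw⟩
      rw [PySem.List.mem_pyRange_one, PySem.Str.len_eq, ← hn] at hi
      refine ⟨i.toNat - 1, by omega, ?_⟩
      rw [decide_eq_true_eq, ← hw, ← String.toList_inj, pv_gA, pv_gB s _ (by omega)]
      congr 1
      omega
  · intro k1 k2 h1 h2 hq1 hq2
    rw [decide_eq_true_eq] at hq1 hq2
    have := hq1 ▸ hq2   -- w = gA k1, w = gA k2
    have hl : (PySem.Str.slice s (some 0) (some ((k1:Int) + 1))).toList.length
        = (PySem.Str.slice s (some 0) (some ((k2:Int) + 1))).toList.length := by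
      rw [← hq1, ← hq2]
    rw [pv_gA, pv_gA] at hl
    simp [List.length_take, ← hn] at hl
    omega

theorem pv_main (words : List String) (s : String) :
    countPrefixes words s = countPrefixes_alt words s := by
  have hrange : PySem.List.pyRange 0 (PySem.Str.len s)
      = (List.range s.toList.length).map (fun (k : Nat) => (k : Int)) := by
    rw [PySem.Str.len_eq]; exact PySem.List.pyRange_zero_natCast _
  simp only [countPrefixes, countPrefixes_alt]
  rw [PySem.List.foldl_pyRange_pyGetD words ""
    (fun x w => (PySem.List.pyRange 0 (PySem.Str.len s)).foldl
      (fun x j => if w = PySem.Str.slice s (some 0) (some (j + 1)) then x ++ [w] else x) x)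
    [] le_rfl]
  rw [Int.toNat_zero, List.drop_zero]
  rw [List.foldl_ext _
    (fun x w => x ++ ((List.range s.toList.length).filter
      (fun (k : Nat) => decide (w = PySem.Str.slice s (some 0) (some ((k:Int) + 1))))).map
      (fun _ => w)) []
    (fun x w _ => by rw [hrange, List.foldl_map, pv_inner])]
  rw [PySem.List.len_eq, pv_len_foldl_append]
  simp only [List.length_map, List.length_nil, Nat.zero_add, ← List.countP_eq_length_filter]
  rw [List.map_congr_left (fun w _ => pv_word s w)]
  rw [pv_sum_map_ite]

-- ===== VERDICT (by name: the statement is the Claim_ definition above) =====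
theorem countPrefixes_spec : Claim_equal_countPrefixes := by
  intro words s _
  unfold Spec_countPrefixes
  exact pv_main words s
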